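-- pv_equiv track=rewrite | github.com/Jimmy980212/Vuldetection_System | llm_trigger_path_constructor.py | _check_reachability
-- ===== SOURCE A (Python) =====
-- from typing import Dict, List, Any, Tuple, Set
-- from collections import defaultdict, deque
--
-- def _check_reachability(source: str, sink: str,
--                       reachability_graph: Dict[str, List[str]]) -> bool:
--     """检查从 source 到 sink 是否可达"""
--     if source == sink:
--         return True
--
--     visited = set()
--     queue = deque([source])
--
--     while queue:
--         current = queue.popleft()
--
--         if current == sink:
--             return True
--
--         if current in visited:
--             continue
--
--         visited.add(current)
--
--         # 添加所有可达的节点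
--         for neighbor in reachability_graph.get(current, []):
--             if neighbor not in visited:
--                 queue.append(neighbor)
--
--     return False
-- ===== SOURCE B (Python) =====
-- def _check_reachability(source: str, sink: str, reachability_graph) -> bool:
--     """Reachability via stack-based saturation: compute the full set of nodes
--     reachable from source (marking nodes when first discovered), then test
--     whether sink is in that set."""
--     if source == sink:
--         return True
--     seen = {source}
--     stack = [source]
--     while stack:
--         node = stack.pop()
--         for neighbor in reachability_graph.get(node, []):
--             if neighbor not in seen:
--                 seen.add(neighbor)
--                 stack.append(neighbor)
--     return sink in seen
-- ===== Notes on version B (the rewrite author's own statement) =====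
-- stated objective: simpler
-- what changed: Replaces A's early-exit BFS (FIFO deque, sink test at dequeue, mark-on-dequeue with a skip-if-visited branch) by a stack-based saturation that marks nodes when first discovered, computes the full reachable set with no early exit, and tests sink membership once at the end.
import Mathlib
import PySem

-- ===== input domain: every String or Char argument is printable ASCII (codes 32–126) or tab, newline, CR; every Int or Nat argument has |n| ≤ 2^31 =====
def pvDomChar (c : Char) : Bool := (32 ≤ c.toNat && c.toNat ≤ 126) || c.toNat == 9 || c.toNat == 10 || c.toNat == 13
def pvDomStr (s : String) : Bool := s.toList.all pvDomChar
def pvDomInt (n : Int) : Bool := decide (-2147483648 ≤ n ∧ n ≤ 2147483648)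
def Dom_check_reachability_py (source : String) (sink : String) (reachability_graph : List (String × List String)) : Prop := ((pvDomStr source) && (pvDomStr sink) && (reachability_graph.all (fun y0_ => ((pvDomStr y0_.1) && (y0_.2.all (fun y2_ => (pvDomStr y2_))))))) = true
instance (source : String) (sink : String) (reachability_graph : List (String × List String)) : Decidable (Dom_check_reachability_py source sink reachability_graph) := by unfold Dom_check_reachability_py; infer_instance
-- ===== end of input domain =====

-- B replaces A's early-exit BFS (FIFO queue, mark-on-dequeue) by a stack-based
-- saturation that marks nodes on discovery, computes the full reachable set and
-- tests sink membership at the end (objective: simpler).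

-- reachability_graph.get(v, []): first-match association-list lookup (dict convention)
def pvAdj (g : List (String × List String)) (v : String) : List String :=
  (List.lookup v g).getD []

-- every neighbour list entry lies in the flattened value lists (for termination)
theorem pvAdj_subset (g : List (String × List String)) (v x : String)
    (hx : x ∈ pvAdj g v) : x ∈ (g.map Prod.snd).flatten := by
  induction g with
  | nil => simp [pvAdj] at hx
  | cons p g ih =>
    obtain ⟨k, vs⟩ := p
    simp only [pvAdj, List.lookup] at hx
    simp only [List.map_cons, List.flatten_cons, List.mem_append]
    by_cases h : v == k
    · rw [h] at hx
      exact Or.inl (by simpa using hx)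
    · rw [Bool.not_eq_true] at h
      rw [h] at hx
      exact Or.inr (ih hx)

-- strict decrease of a filtered length when the predicate loses a present witness
theorem pvFilter_length_lt {α : Type} (l : List α) (p q : α → Bool)
    (himp : ∀ x, q x = true → p x = true) (a : α) (ha : a ∈ l)
    (hpa : p a = true) (hqa : q a = false) :
    (l.filter q).length < (l.filter p).length := by
  induction l with
  | nil => simp at ha
  | cons b l ih =>
    have hle : (l.filter q).length ≤ (l.filter p).length :=
      List.Sublist.length_le (List.monotone_filter_right l (fun x hx => himp x hx))
    rcases List.mem_cons.mp ha with rfl | hb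
    · simp only [List.filter_cons, hpa, hqa]
      simpa using Nat.lt_succ_of_le hle
    · have h := ih hb
      by_cases hq : q b = true
      · simp only [List.filter_cons, hq, himp b hq, if_pos]
        simpa using Nat.succ_lt_succ h
      · rcases hp : p b <;>
          simp only [List.filter_cons, hq, hp, Bool.false_eq_true, if_pos,
            List.length_cons, reduceIte] <;> omega

-- ===== PORT A =====
-- A's BFS loop: FIFO queue, sink test at dequeue, mark-on-dequeue, skip visited.
-- U and hq are only a termination guard (every queued node lies in U).
def pvBfs (sink : String) (g : List (String × List String)) (U : List String)
    (visited : PySem.Set String) (queue : List String)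
    (hq : ∀ v ∈ queue, v ∈ U)
    (hU : ∀ x ∈ (g.map Prod.snd).flatten, x ∈ U) : Bool :=
  match queue with
  | [] => false
  | current :: rest =>
    if current = sink then true
    else if hv : current ∈ visited then
      pvBfs sink g U visited rest (fun v h => hq v (List.mem_cons_of_mem _ h)) hU
    else
      pvBfs sink g U (PySem.Set.add visited current)
        (rest ++ (pvAdj g current).filter
          (fun n => decide (n ∉ PySem.Set.add visited current)))
        (by
          intro v h
          rcases List.mem_append.mp h with h' | h'
          · exact hq v (List.mem_cons_of_mem _ h')
          · exact hU v (pvAdj_subset g current v (List.mem_of_mem_filter h')))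
        hU
  termination_by ((U.filter (fun u => decide (u ∉ visited))).length, queue.length)
  decreasing_by
  · apply Prod.Lex.right
    exact Nat.lt_succ_self _
  · apply Prod.Lex.left
    refine pvFilter_length_lt U _ _ ?_ current (hq current List.mem_cons_self) ?_ ?_
    · intro x hx
      simp only [decide_eq_true_eq, PySem.Set.mem_add, not_or] at hx ⊢
      exact hx.1
    · simpa using hv
    · simp [PySem.Set.mem_add]

def check_reachability_py (source : String) (sink : String)
    (reachability_graph : List (String × List String)) : Bool :=
  if source = sink then true
  else
    pvBfs sink reachability_graph (source :: (reachability_graph.map Prod.snd).flatten)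
      PySem.Set.empty [source]
      (by intro v hv; simp only [List.mem_singleton] at hv; simp [hv])
      (fun x hx => List.mem_cons_of_mem _ hx)

-- ===== PORT B =====
-- the inner 'for neighbor in g.get(node, []): if neighbor not in seen: mark and push'
def pvDfsPush (seen : PySem.Set String) (stack : List String) :
    List String → PySem.Set String × List String
  | [] => (seen, stack)
  | n :: ns =>
    if n ∈ seen then pvDfsPush seen stack ns
    else pvDfsPush (PySem.Set.add seen n) (n :: stack) ns

theorem pvDfsPush_seen_iff (neighbors : List String) (seen : PySem.Set String)
    (stack : List String) (x : String) :
    x ∈ (pvDfsPush seen stack neighbors).1 ↔ x ∈ seen ∨ x ∈ neighbors := by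
  induction neighbors generalizing seen stack with
  | nil => simp [pvDfsPush]
  | cons n ns ih =>
    by_cases h : n ∈ seen
    · rw [pvDfsPush, if_pos h, ih]
      simp only [List.mem_cons]
      constructor
      · rintro (h' | h')
        · exact Or.inl h'
        · exact Or.inr (Or.inr h')
      · rintro (h' | rfl | h')
        · exact Or.inl h'
        · exact Or.inl h
        · exact Or.inr h'
    · rw [pvDfsPush, if_neg h, ih]
      simp only [PySem.Set.mem_add, List.mem_cons]
      tauto

theorem pvDfsPush_cases (neighbors : List String) (seen : PySem.Set String)
    (stack : List String) :
    pvDfsPush seen stack neighbors = (seen, stack) ∨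
      ∃ a, a ∈ neighbors ∧ a ∉ seen := by
  induction neighbors generalizing seen stack with
  | nil => exact Or.inl rfl
  | cons n ns ih =>
    by_cases h : n ∈ seen
    · rw [pvDfsPush, if_pos h]
      rcases ih seen stack with h' | ⟨a, ha, hna⟩
      · exact Or.inl h'
      · exact Or.inr ⟨a, List.mem_cons_of_mem _ ha, hna⟩
    · exact Or.inr ⟨n, List.mem_cons_self, h⟩

-- B's outer loop: pop the stack top, discover-and-push fresh neighbours, recurse;
-- returns the saturated seen-set.
def pvDfs (g : List (String × List String)) (seen : PySem.Set String)
    (stack : List String) : PySem.Set String :=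
  match stack with
  | [] => seen
  | node :: rest =>
    pvDfs g (pvDfsPush seen rest (pvAdj g node)).1 (pvDfsPush seen rest (pvAdj g node)).2
  termination_by
    (((g.map Prod.snd).flatten.filter (fun u => decide (u ∉ seen))).length, stack.length)
  decreasing_by
    rcases pvDfsPush_cases (pvAdj g node) seen rest with heq | ⟨a, ha, hna⟩
    · rw [heq]
      apply Prod.Lex.right
      exact Nat.lt_succ_self _
    · apply Prod.Lex.left
      refine pvFilter_length_lt _ _ _ ?_ a (pvAdj_subset g node a ha) ?_ ?_
      · intro x hx
        simp only [decide_eq_true_eq] at hx ⊢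
        intro hmem
        exact hx ((pvDfsPush_seen_iff _ _ _ _).mpr (Or.inl hmem))
      · simpa using hna
      · simp [pvDfsPush_seen_iff, ha]

def check_reachability_py_alt (source : String) (sink : String)
    (reachability_graph : List (String × List String)) : Bool :=
  if source = sink then true
  else
    PySem.Set.contains
      (pvDfs reachability_graph (PySem.Set.ofList [source]) [source]) sink

-- ===== PRECONDITION & SPEC =====
def Spec_check_reachability_py (source : String) (sink : String) (reachability_graph : List (String × List String)) (out : Bool) : Prop := out = check_reachability_py_alt source sink reachability_graph
instance (source : String) (sink : String) (reachability_graph : List (String × List String)) (out : Bool) : Decidable (Spec_check_reachability_py source sink reachability_graph out) := by unfold Spec_check_reachability_py; infer_instance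

-- ===== CLAIM (what is proved, stated in full; the proofs are below) =====
def Claim_equal_check_reachability_py : Prop := ∀ (source : String) (sink : String) (reachability_graph : List (String × List String)), Dom_check_reachability_py source sink reachability_graph → Spec_check_reachability_py source sink reachability_graph (check_reachability_py source sink reachability_graph)

-- ===== LEMMAS AND PROOFS =====

theorem pvDfsPush_stack_iff (neighbors : List String) (seen : PySem.Set String)
    (stack : List String) (x : String) :
    x ∈ (pvDfsPush seen stack neighbors).2 ↔
      x ∈ stack ∨ (x ∈ neighbors ∧ x ∉ seen) := by
  induction neighbors generalizing seen stack with
  | nil => simp [pvDfsPush]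
  | cons n ns ih =>
    by_cases h : n ∈ seen
    · rw [pvDfsPush, if_pos h, ih]
      constructor
      · rintro (h' | ⟨h1, h2⟩)
        · exact Or.inl h'
        · exact Or.inr ⟨List.mem_cons_of_mem _ h1, h2⟩
      · rintro (h' | ⟨h1, h2⟩)
        · exact Or.inl h'
        · rcases List.mem_cons.mp h1 with rfl | h1
          · exact absurd h h2
          · exact Or.inr ⟨h1, h2⟩
    · rw [pvDfsPush, if_neg h, ih]
      simp only [List.mem_cons, PySem.Set.mem_add, not_or]
      constructor
      · rintro ((rfl | h') | ⟨h1, h2, h3⟩)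
        · exact Or.inr ⟨Or.inl rfl, h⟩
        · exact Or.inl h'
        · exact Or.inr ⟨Or.inr h1, h2⟩
      · rintro (h' | ⟨(rfl | h1), h2⟩)
        · exact Or.inl (Or.inr h')
        · exact Or.inl (Or.inl rfl)
        · by_cases hxn : x = n
          · exact Or.inl (Or.inl hxn)
          · exact Or.inr ⟨h1, h2, hxn⟩


-- reachability avoiding steps OUT of V (matches BFS's mark-on-dequeue)
inductive pvRA (adj : String → List String) (V : String → Prop) : String → String → Prop
  | refl (a : String) : pvRA adj V a a
  | step {a b c : String} : ¬ V a → b ∈ adj a → pvRA adj V b c → pvRA adj V a c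

-- reachability avoiding steps INTO V (matches DFS's mark-on-discovery)
inductive pvRT (adj : String → List String) (V : String → Prop) : String → String → Prop
  | refl (a : String) : pvRT adj V a a
  | step {a b c : String} : b ∈ adj a → ¬ V b → pvRT adj V b c → pvRT adj V a c

theorem pvRA_mono {adj : String → List String} {V V' : String → Prop}
    (h : ∀ x, V x → V' x) {a c : String} (hr : pvRA adj V' a c) : pvRA adj V a c := by
  induction hr with
  | refl a => exact pvRA.refl a
  | step hna hb _ ih => exact pvRA.step (fun hv => hna (h _ hv)) hb ih

theorem pvRT_mono {adj : String → List String} {V V' : String → Prop}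
    (h : ∀ x, V x → V' x) {a c : String} (hr : pvRT adj V' a c) : pvRT adj V a c := by
  induction hr with
  | refl a => exact pvRT.refl a
  | step hb hnb _ ih => exact pvRT.step hb (fun hv => hnb (h _ hv)) ih

-- shortcut lemma: a path avoiding V either avoids V ∪ {w}, or enters via w's successors
theorem pvRA_split {adj : String → List String} {V : String → Prop} (w : String)
    {v t : String} (hr : pvRA adj V v t) :
    pvRA adj (fun x => V x ∨ x = w) v t ∨
      (¬ V w ∧ ∃ n ∈ adj w, pvRA adj (fun x => V x ∨ x = w) n t) := by
  induction hr with
  | refl a => exact Or.inl (pvRA.refl a)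
  | step hna hb hr ih =>
    rename_i a b c
    rcases ih with ih | ih
    · by_cases haw : a = w
      · exact Or.inr ⟨haw ▸ hna, b, haw ▸ hb, ih⟩
      · exact Or.inl (pvRA.step (by tauto) hb ih)
    · exact Or.inr ih

-- same shortcut for target-avoiding paths, for an arbitrary enlargement of V
theorem pvRT_split {adj : String → List String} {V V' : String → Prop}
    (_h : ∀ x, V x → V' x) {v t : String} (hr : pvRT adj V v t) :
    pvRT adj V' v t ∨ ∃ w, V' w ∧ ¬ V w ∧ pvRT adj V' w t := by
  induction hr with
  | refl a => exact Or.inl (pvRT.refl a)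
  | step hb hnb hr ih =>
    rename_i a b c
    rcases ih with ih | ih
    · by_cases hbV : V' b
      · exact Or.inr ⟨b, hbV, hnb, ih⟩
      · exact Or.inl (pvRT.step hb hbV ih)
    · exact Or.inr ih

theorem pvRA_not_of_mem {adj : String → List String} {V : String → Prop}
    {x t : String} (hx : V x) (ht : ¬ V t) : ¬ pvRA adj V x t := by
  intro h
  cases h with
  | refl => exact ht hx
  | step hna _ _ => exact hna hx

-- with nothing avoided both predicates are plain reachability
theorem pvRA_iff_pvRT_empty {adj : String → List String} {a c : String} :
    pvRA adj (fun _ => False) a c ↔ pvRT adj (fun _ => False) a c := by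
  constructor
  · intro h
    induction h with
    | refl a => exact pvRT.refl a
    | step _ hb _ ih => exact pvRT.step hb (fun h => h) ih
  · intro h
    induction h with
    | refl a => exact pvRA.refl a
    | step hb _ _ ih => exact pvRA.step (fun h => h) hb ih

-- BFS loop invariant: the loop succeeds iff some queued node reaches sink
-- by a path whose expanded (non-final) nodes avoid visited
theorem pvBfs_iff (sink : String) (g : List (String × List String)) (U : List String)
    (visited : PySem.Set String) (queue : List String) (hq : ∀ v ∈ queue, v ∈ U)
    (hU : ∀ x ∈ (g.map Prod.snd).flatten, x ∈ U) :
    sink ∉ visited →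
      (pvBfs sink g U visited queue hq hU = true ↔
        ∃ v ∈ queue, pvRA (pvAdj g) (fun x => x ∈ visited) v sink) := by
  fun_induction pvBfs with
  | case1 visited hq _ =>
    intro _
    simp
  | case2 visited rest hq _ =>
    intro _
    exact iff_of_true rfl ⟨sink, List.mem_cons_self, pvRA.refl sink⟩
  | case3 visited current rest hq hcur hv _ ih =>
    intro hsink
    rw [ih hsink]
    constructor
    · rintro ⟨v, hv', hr⟩
      exact ⟨v, List.mem_cons_of_mem _ hv', hr⟩
    · rintro ⟨v, hv', hr⟩
      rcases List.mem_cons.mp hv' with rfl | hv'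
      · exact absurd hr (pvRA_not_of_mem hv hsink)
      · exact ⟨v, hv', hr⟩
  | case4 visited current rest hq hcur hv _ ih =>
    intro hsink
    have hsink' : sink ∉ PySem.Set.add visited current := by
      simp only [PySem.Set.mem_add]
      rintro (h | h)
      · exact hsink h
      · exact hcur h.symm
    rw [ih hsink']
    constructor
    · rintro ⟨v, hv', hr⟩
      have hr0 : pvRA (pvAdj g) (fun x => x ∈ visited) v sink := by
        refine pvRA_mono ?_ hr
        intro x hx
        simp [PySem.Set.mem_add, hx]
      rcases List.mem_append.mp hv' with h' | h'
      · exact ⟨v, List.mem_cons_of_mem _ h', hr0⟩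
      · have hvadj : v ∈ pvAdj g current := List.mem_of_mem_filter h'
        exact ⟨current, List.mem_cons_self, pvRA.step hv hvadj hr0⟩
    · rintro ⟨v, hv', hr⟩
      have key : ∀ u, pvRA (pvAdj g) (fun x => x ∈ visited) u sink →
          (∃ w ∈ rest ++ (pvAdj g current).filter
              (fun n => decide (n ∉ PySem.Set.add visited current)),
            pvRA (pvAdj g) (fun x => x ∈ PySem.Set.add visited current) w sink) ∨
          pvRA (pvAdj g) (fun x => x ∈ PySem.Set.add visited current) u sink := by
        intro u hu
        have := pvRA_split (adj := pvAdj g) current hu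
        rcases this with h1 | ⟨hncur, n, hn, hrn⟩
        · refine Or.inr (pvRA_mono ?_ h1)
          intro x hx
          simpa [PySem.Set.mem_add] using hx
        · left
          have hrn' : pvRA (pvAdj g) (fun x => x ∈ PySem.Set.add visited current) n sink := by
            refine pvRA_mono ?_ hrn
            intro x hx
            simpa [PySem.Set.mem_add] using hx
          have hnmem : n ∉ PySem.Set.add visited current := by
            intro hmem
            exact pvRA_not_of_mem hmem hsink' hrn'
          refine ⟨n, List.mem_append.mpr (Or.inr ?_), hrn'⟩
          exact List.mem_filter.mpr ⟨hn, by simpa using hnmem⟩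
      rcases List.mem_cons.mp hv' with rfl | hv'
      · rcases key v hr with ⟨w, hw, hrw⟩ | h1
        · exact ⟨w, hw, hrw⟩
        · cases h1 with
          | refl => exact absurd rfl hcur
          | step hna hb hr' =>
            exact absurd (by simp [PySem.Set.mem_add] : v ∈ PySem.Set.add visited v) hna
      · rcases key v hr with ⟨w, hw, hrw⟩ | h1
        · exact ⟨w, hw, hrw⟩
        · exact ⟨v, List.mem_append.mpr (Or.inl hv'), h1⟩

-- DFS saturation invariant: membership in the final seen-set
theorem pvDfs_mem (g : List (String × List String)) (seen : PySem.Set String)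
    (stack : List String) (hsub : ∀ v ∈ stack, v ∈ seen) (x : String) :
    x ∈ pvDfs g seen stack ↔
      x ∈ seen ∨ ∃ v ∈ stack, pvRT (pvAdj g) (fun y => y ∈ seen) v x := by
  fun_induction pvDfs with
  | case1 => simp
  | case2 seen node rest ih =>
    have hsub' : ∀ v ∈ (pvDfsPush seen rest (pvAdj g node)).2,
        v ∈ (pvDfsPush seen rest (pvAdj g node)).1 := by
      intro v hv
      rw [pvDfsPush_stack_iff] at hv
      rw [pvDfsPush_seen_iff]
      rcases hv with hv | ⟨hv, _⟩
      · exact Or.inl (hsub v (List.mem_cons_of_mem _ hv))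
      · exact Or.inr hv
    rw [ih hsub']
    have hmono : ∀ y : String, y ∈ seen → y ∈ (pvDfsPush seen rest (pvAdj g node)).1 := by
      intro y hy
      rw [pvDfsPush_seen_iff]
      exact Or.inl hy
    constructor
    · rintro (hx | ⟨v, hv, hr⟩)
      · rw [pvDfsPush_seen_iff] at hx
        rcases hx with hx | hx
        · exact Or.inl hx
        · by_cases hxs : x ∈ seen
          · exact Or.inl hxs
          · exact Or.inr ⟨node, List.mem_cons_self, pvRT.step hx hxs (pvRT.refl x)⟩
      · have hr0 : pvRT (pvAdj g) (fun y => y ∈ seen) v x := pvRT_mono hmono hr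
        rw [pvDfsPush_stack_iff] at hv
        rcases hv with hv | ⟨hv, hvs⟩
        · exact Or.inr ⟨v, List.mem_cons_of_mem _ hv, hr0⟩
        · exact Or.inr ⟨node, List.mem_cons_self, pvRT.step hv hvs hr0⟩
    · rintro (hx | ⟨v, hv, hr⟩)
      · exact Or.inl (hmono x hx)
      · have split := pvRT_split hmono hr
        rcases split with h1 | ⟨w, hw1, hw2, hw3⟩
        · rcases List.mem_cons.mp hv with rfl | hv
          · -- path from node: every successor of node is in the new seen, so only refl fits
            cases h1 with
            | refl => exact Or.inl (hmono x (hsub x List.mem_cons_self))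
            | step hb hnb hr' =>
              exact absurd ((pvDfsPush_seen_iff _ _ _ _).mpr (Or.inr hb)) hnb
          · exact Or.inr ⟨v, (pvDfsPush_stack_iff _ _ _ _).mpr (Or.inl hv), h1⟩
        · rw [pvDfsPush_seen_iff] at hw1
          rcases hw1 with hw1 | hw1
          · exact absurd hw1 hw2
          · exact Or.inr ⟨w, (pvDfsPush_stack_iff _ _ _ _).mpr (Or.inr ⟨hw1, hw2⟩), hw3⟩

-- top-level: both programs decide plain reachability
theorem pv_main (source sink : String) (g : List (String × List String)) :
    check_reachability_py source sink g = check_reachability_py_alt source sink g := by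
  by_cases hss : source = sink
  · simp [check_reachability_py, check_reachability_py_alt, hss]
  · have hA := pvBfs_iff sink g (source :: (g.map Prod.snd).flatten) PySem.Set.empty
      [source] (by intro v hv; simp only [List.mem_singleton] at hv; simp [hv])
      (fun x hx => List.mem_cons_of_mem _ hx)
      (by simp [PySem.Set.empty])
    have hB := pvDfs_mem g (PySem.Set.ofList [source]) [source]
      (by intro v hv; simpa [PySem.Set.mem_ofList] using hv) sink
    have hAiff : check_reachability_py source sink g = true ↔
        pvRA (pvAdj g) (fun _ => False) source sink := by
      rw [check_reachability_py, if_neg hss, hA]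
      constructor
      · rintro ⟨v, hv, hr⟩
        rcases List.mem_singleton.mp hv with rfl
        exact pvRA_mono (fun x hx => hx.elim) (pvRA_mono (fun x hx => hx) hr)
      · intro hr
        refine ⟨source, List.mem_singleton.mpr rfl, pvRA_mono ?_ hr⟩
        intro x hx
        simp [PySem.Set.empty] at hx
    have hBiff : check_reachability_py_alt source sink g = true ↔
        pvRA (pvAdj g) (fun _ => False) source sink := by
      rw [check_reachability_py_alt, if_neg hss, PySem.Set.contains_iff, hB]
      constructor
      · rintro (hmem | ⟨v, hv, hr⟩)
        · exact absurd ((List.mem_singleton.mp (by simpa [PySem.Set.mem_ofList] using hmem)).symm) hss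
        · rcases List.mem_singleton.mp hv with rfl
          exact pvRA_iff_pvRT_empty.mpr (pvRT_mono (fun x hx => hx.elim) hr)
      · intro hr
        right
        refine ⟨source, List.mem_singleton.mpr rfl, ?_⟩
        have h0 : pvRT (pvAdj g) (fun _ => False) source sink := pvRA_iff_pvRT_empty.mp hr
        rcases pvRT_split (V' := fun y => y ∈ PySem.Set.ofList [source])
            (fun x hx => hx.elim) h0 with h1 | ⟨w, hw1, _, hw3⟩
        · exact h1
        · have hw : w = source := by simpa [PySem.Set.mem_ofList] using hw1
          exact hw ▸ hw3
    have hfin : check_reachability_py source sink g = true ↔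
        check_reachability_py_alt source sink g = true := hAiff.trans hBiff.symm
    cases hx : check_reachability_py source sink g <;>
      cases hy : check_reachability_py_alt source sink g <;> simp_all

-- ===== VERDICT (by name: the statement is the Claim_ definition above) =====
theorem check_reachability_py_spec : Claim_equal_check_reachability_py := by
  intro source sink g _
  unfold Spec_check_reachability_py
  exact pv_main source sink g
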